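-- pv_equiv track=rewrite | github.com/mohithssm/CP_2019501093 | 03-kth_occurrences-Python/kth_occurrences.py | fun_kth_occurrences
-- ===== SOURCE A (Python) =====
-- def fun_kth_occurrences(s, n):
-- 	dict = {}
-- 	for elem in s:
-- 		if elem in dict:
-- 			dict[elem] = dict[elem] + 1
-- 		else:
-- 			dict[elem] = 1
--
-- 	result = sorted(dict.items(), key = lambda l : l[1], reverse = True)
-- 	return result[n-1][0]
-- ===== SOURCE B (Python) =====
-- def fun_kth_occurrences(s, n):
--     counts = {}
--     for x in s:
--         counts[x] = counts.get(x, 0) + 1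
--     buckets = {}
--     for key, c in counts.items():
--         buckets.setdefault(c, []).append(key)
--     maxc = 0
--     for c in counts.values():
--         if maxc < c:
--             maxc = c
--     ordered = []
--     for c in range(maxc, 0, -1):
--         ordered += buckets.get(c, [])
--     return ordered[n - 1]
-- ===== Notes on version B (the rewrite author's own statement) =====
-- stated objective: alternative
-- what changed: Replaces the comparison sort over (key,count) items by count buckets scanned from the maximum count downward (bucket/counting selection), preserving insertion-order stability within each count.
import Mathlib
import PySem

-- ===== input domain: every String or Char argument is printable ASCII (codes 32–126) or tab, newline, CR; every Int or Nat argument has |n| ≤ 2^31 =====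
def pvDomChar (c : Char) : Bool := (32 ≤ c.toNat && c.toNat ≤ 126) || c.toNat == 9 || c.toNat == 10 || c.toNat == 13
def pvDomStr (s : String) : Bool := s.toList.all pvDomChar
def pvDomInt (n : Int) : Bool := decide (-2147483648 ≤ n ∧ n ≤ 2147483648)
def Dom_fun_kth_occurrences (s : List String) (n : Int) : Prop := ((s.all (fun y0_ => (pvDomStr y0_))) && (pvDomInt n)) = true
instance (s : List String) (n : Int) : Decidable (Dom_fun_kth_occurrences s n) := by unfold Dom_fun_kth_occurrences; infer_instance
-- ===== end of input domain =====

-- B replaces A's comparison sort of the (key, count) items by count buckets scanned from the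
-- maximum count downward (stable within each bucket); equal return values proved on Pre_.

-- ===== PORT A =====
def fun_kth_occurrences (s : List String) (n : Int) : String :=
  let d := s.foldl
    (fun d elem =>
      if d.contains elem then d.insert elem (d.getD elem 0 + 1)
      else d.insert elem 1)
    (PySem.Dict.empty : PySem.Dict String Int)
  let result := PySem.List.sorted d.items (fun l => l.2) true
  match PySem.List.pyGet? result (n - 1) with
  | some p => p.1
  | none => ""   -- IndexError in Python; excluded by Pre_

-- ===== PORT B =====
def fun_kth_occurrences_alt (s : List String) (n : Int) : String :=
  let counts := s.foldl (fun d x => d.insert x (d.getD x 0 + 1)) (PySem.Dict.empty : PySem.Dict String Int)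
  let buckets := counts.items.foldl
    (fun b p => b.modify p.2 [] (fun l => l ++ [p.1])) (PySem.Dict.empty : PySem.Dict Int (List String))
  let maxc := counts.values.foldl (fun m c => if m < c then c else m) 0
  let ordered := (PySem.List.pyRange maxc 0 (-1)).foldl
    (fun acc c => acc ++ buckets.getD c []) []
  match PySem.List.pyGet? ordered (n - 1) with
  | some k => k
  | none => ""   -- IndexError in Python; excluded by Pre_

-- ===== PRECONDITION & SPEC =====
-- Pre_ excludes exactly the inputs where Python's result[n-1] raises IndexError
-- (index n-1 outside [-k, k) for k = number of distinct elements of s).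
def Pre_fun_kth_occurrences (s : List String) (n : Int) : Prop :=
  -((PySem.Set.ofList s).length : Int) ≤ n - 1 ∧ n - 1 < ((PySem.Set.ofList s).length : Int)
instance (s : List String) (n : Int) : Decidable (Pre_fun_kth_occurrences s n) := by
  unfold Pre_fun_kth_occurrences; infer_instance
def pvWitness_fun_kth_occurrences : List String × Int := (["a", "b", "a"], 1)
def Spec_fun_kth_occurrences (s : List String) (n : Int) (out : String) : Prop := out = fun_kth_occurrences_alt s n
instance (s : List String) (n : Int) (out : String) : Decidable (Spec_fun_kth_occurrences s n out) := by unfold Spec_fun_kth_occurrences; infer_instance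

-- ===== CLAIM (what is proved, stated in full; the proofs are below) =====
def Claim_equal_fun_kth_occurrences : Prop := ∀ (s : List String) (n : Int), Dom_fun_kth_occurrences s n → Pre_fun_kth_occurrences s n → Spec_fun_kth_occurrences s n (fun_kth_occurrences s n)

-- ===== LEMMAS AND PROOFS =====

theorem pyGet?_map {α β : Type} (f : α → β) (xs : List α) (i : Int) :
    PySem.List.pyGet? (xs.map f) i = (PySem.List.pyGet? xs i).map f := by
  unfold PySem.List.pyGet?
  cases h : PySem.List.pyIdx? xs.length i <;> simp [h]

theorem insertBy_append_of_forall_not {α : Type} (before : α → α → Bool) (x : α)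
    (zs ws : List α) (h : ∀ y ∈ zs, before x y = false) :
    PySem.List.insertBy before x (zs ++ ws) = zs ++ PySem.List.insertBy before x ws := by
  induction zs with
  | nil => simp
  | cons y zs ih =>
    simp only [List.cons_append, PySem.List.insertBy, h y (by simp)]
    simp [ih (fun y hy => h y (by simp [hy]))]

theorem sorted_rev_eq_flatMap {α : Type} (key : α → Int) (cs : List Int)
    (hdesc : cs.Pairwise (· > ·)) (xs : List α) (hmem : ∀ x ∈ xs, key x ∈ cs) :
    PySem.List.sorted xs key true
      = cs.flatMap (fun c => xs.filter (fun x => key x == c)) := by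
  induction xs using List.reverseRecOn with
  | nil => simp [PySem.List.sorted]
  | append_singleton xs x ih =>
    have hx : key x ∈ cs := hmem x (by simp)
    obtain ⟨hi, lo, hcs⟩ := List.append_of_mem hx
    have hpair := hcs ▸ hdesc
    rw [List.pairwise_append] at hpair
    obtain ⟨hhi, hlo', hcross⟩ := hpair
    rw [List.pairwise_cons] at hlo'
    obtain ⟨hlo_lt, _⟩ := hlo'
    have hhi_gt : ∀ c ∈ hi, c > key x := fun c hc => hcross c hc (key x) (by simp)
    have ihx := ih (fun y hy => hmem y (by simp [hy]))
    rw [PySem.List.sorted_rev_eq_foldl_insertBy] at ihx ⊢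
    rw [List.foldl_append, List.foldl_cons, List.foldl_nil, ihx, hcs]
    rw [List.flatMap_append, List.flatMap_cons]
    rw [insertBy_append_of_forall_not _ _ _ _ (by
      intro y hy
      simp only [List.mem_flatMap, List.mem_filter] at hy
      obtain ⟨c, hc, _, hkey⟩ := hy
      have : key y = c := by simpa using hkey
      simp [this]
      exact le_of_lt (hhi_gt c hc))]
    rw [show PySem.List.insertBy (fun a b => decide (key b < key a)) x
          (List.filter (fun x_1 => key x_1 == key x) xs ++ lo.flatMap (fun c => xs.filter (fun x => key x == c)))
        = List.filter (fun x_1 => key x_1 == key x) xs ++ PySem.List.insertBy (fun a b => decide (key b < key a)) x (lo.flatMap (fun c => xs.filter (fun x => key x == c)))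
      from insertBy_append_of_forall_not _ _ _ _ (by
        intro y hy
        simp only [List.mem_filter] at hy
        have : key y = key x := by simpa using hy.2
        simp [this])]
    -- front insertion into the lo part
    have hfront : PySem.List.insertBy (fun a b => decide (key b < key a)) x
        (lo.flatMap (fun c => xs.filter (fun x => key x == c)))
        = x :: lo.flatMap (fun c => xs.filter (fun x => key x == c)) := by
      cases hlo : lo.flatMap (fun c => xs.filter (fun x => key x == c)) with
      | nil => simp [PySem.List.insertBy]
      | cons y ys =>
        have hy : y ∈ lo.flatMap (fun c => xs.filter (fun x => key x == c)) := by simp [hlo]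
        simp only [List.mem_flatMap, List.mem_filter] at hy
        obtain ⟨c, hc, _, hkey⟩ := hy
        have hk : key y = c := by simpa using hkey
        have : key y < key x := hk ▸ hlo_lt c hc
        simp [PySem.List.insertBy, this]
    rw [hfront]
    -- now compare the flatMaps of filters over xs ++ [x]
    have hfhi : hi.flatMap (fun c => (xs ++ [x]).filter (fun x => key x == c))
        = hi.flatMap (fun c => xs.filter (fun x => key x == c)) := by
      apply List.flatMap_congr
      intro c hc
      have : ¬ (key x = c) := by have := hhi_gt c hc; omega
      simp [List.filter_append, this]
    have hflo : lo.flatMap (fun c => (xs ++ [x]).filter (fun x => key x == c))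
        = lo.flatMap (fun c => xs.filter (fun x => key x == c)) := by
      apply List.flatMap_congr
      intro c hc
      have : ¬ (key x = c) := by have := hlo_lt c hc; omega
      simp [List.filter_append, this]
    have hfmid : (xs ++ [x]).filter (fun x_1 => key x_1 == key x)
        = xs.filter (fun x_1 => key x_1 == key x) ++ [x] := by
      simp [List.filter_append]
    rw [List.flatMap_append, List.flatMap_cons, hfhi, hflo, hfmid]
    simp


theorem ab_agree (s : List String) (n : Int)
    (hpre : -((PySem.Set.ofList s).length : Int) ≤ n - 1 ∧ n - 1 < ((PySem.Set.ofList s).length : Int)) :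
    fun_kth_occurrences s n = fun_kth_occurrences_alt s n := by
  dsimp only [fun_kth_occurrences, fun_kth_occurrences_alt]
  -- A's dict is Counter(s)
  have hA : s.foldl
      (fun d elem =>
        if d.contains elem then d.insert elem (d.getD elem 0 + 1)
        else d.insert elem 1)
      PySem.Dict.empty = PySem.Dict.counter s := by
    rw [← PySem.Dict.foldl_insert_getD_add_one_eq_counter]
    congr 1
    funext d elem
    by_cases h : d.contains elem
    · simp [h]
    · rw [if_neg h, PySem.Dict.getD_of_not_contains d 0 (by simpa using h)]; norm_num
  have hB : s.foldl (fun d x => d.insert x (d.getD x 0 + 1)) PySem.Dict.empty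
      = PySem.Dict.counter s := PySem.Dict.foldl_insert_getD_add_one_eq_counter s
  simp only [hA, hB]
  set items := (PySem.Dict.counter s).items with hitems
  set maxc := (PySem.Dict.counter s).values.foldl (fun m c => if m < c then c else m) 0 with hmaxcdef
  -- maxc is an upper bound of the counts
  have hmax_eq : maxc = (PySem.Dict.counter s).values.foldl (fun m c => max m c) 0 := by
    rw [hmaxcdef]
    apply PySem.List.foldl_congr_mem
    intro acc c _
    rcases lt_or_ge acc c with h | h
    · simp [h, max_eq_right (le_of_lt h)]
    · simp [not_lt.mpr h, max_eq_left h]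
  have hub : ∀ c ∈ (PySem.Dict.counter s).values, c ≤ maxc := by
    rw [hmax_eq]; exact (PySem.List.le_foldl_max _ _).2
  -- buckets lookups
  have hbucket : ∀ c : Int,
      (items.foldl (fun (b : PySem.Dict Int (List String)) p => b.modify p.2 [] (fun l => l ++ [p.1])) PySem.Dict.empty).getD c []
        = (items.filter (fun p => p.2 == c)).map (fun p => p.1) := by
    intro c
    have hswap : items.foldl (fun (b : PySem.Dict Int (List String)) p => b.modify p.2 [] (fun l => l ++ [p.1])) PySem.Dict.empty
        = (items.map Prod.swap).foldl (fun (b : PySem.Dict Int (List String)) p => b.modify p.1 [] (fun l => l ++ [p.2])) PySem.Dict.empty := by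
      rw [List.foldl_map]
      simp only [Prod.fst_swap, Prod.snd_swap]
    rw [hswap, PySem.Dict.getD_foldl_modify_append]
    simp [List.filter_map, Function.comp_def, List.map_map]
  -- the descending count list
  have hdesc : (PySem.List.pyRange maxc 0 (-1)).Pairwise (· > ·) := by
    rw [PySem.List.pyRange_neg_one_eq_reverse, List.pairwise_reverse]
    rw [PySem.List.pyRange_one]
    exact List.pairwise_lt_range.map _ (by intro a b h; simpa using h)
  have hmem : ∀ p ∈ items, p.2 ∈ PySem.List.pyRange maxc 0 (-1) := by
    intro p hp
    rw [PySem.List.mem_pyRange_iff_of_neg (by norm_num)]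
    have hval : p.2 ∈ (PySem.Dict.counter s).values := by
      simp only [PySem.Dict.values]
      exact List.mem_map_of_mem hp
    have h1 : p.2 ≤ maxc := hub _ hval
    have h2 : 0 < p.2 := by
      rw [hitems, PySem.Dict.items_counter] at hp
      obtain ⟨k, hk, hkp⟩ := List.mem_map.mp hp
      have : k ∈ s := (PySem.Set.mem_ofList s k).mp hk
      have hc := List.count_pos_iff.mpr this
      have hp2 : p.2 = (List.count k s : Int) := by rw [← hkp]
      omega
    refine ⟨h2, h1, ⟨maxc - p.2, by ring⟩⟩
  -- ordered = map fst of the stable reverse sort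
  have hord : (PySem.List.pyRange maxc 0 (-1)).foldl
      (fun acc c => acc ++ (items.foldl (fun (b : PySem.Dict Int (List String)) p => b.modify p.2 [] (fun l => l ++ [p.1])) PySem.Dict.empty).getD c []) []
      = (PySem.List.sorted items (fun l => l.2) true).map Prod.fst := by
    rw [PySem.List.foldl_append_eq_flatMap, List.nil_append]
    rw [sorted_rev_eq_flatMap (fun l => l.2) _ hdesc items hmem]
    rw [List.map_flatMap]
    apply List.flatMap_congr
    intro c _
    rw [hbucket c]
  rw [hord, pyGet?_map]
  cases h : PySem.List.pyGet? (PySem.List.sorted items (fun l => l.2) true) (n - 1) with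
  | some p => simp
  | none =>
    rw [PySem.List.pyGet?_eq_none_iff] at h
    exfalso
    apply h
    rw [PySem.List.length_sorted, hitems, PySem.Dict.items_counter, List.length_map]
    exact ⟨hpre.1, hpre.2⟩


-- ===== VERDICT (by name: the statement is the Claim_ definition above) =====
theorem fun_kth_occurrences_spec : Claim_equal_fun_kth_occurrences := by
  intro s n _ hpre
  unfold Spec_fun_kth_occurrences
  exact ab_agree s n hpre
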